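-- pv_equiv track=rewrite | github.com/jefflai108/VGNSL | data/trivial_baselines.py | left_branching
-- ===== SOURCE A (Python) =====
-- def left_branching(st):
--     words = st.replace('(', '').replace(')', '').split()
--     if len(words) == 1:
--         return (f'( {words[0]} )')
--     else:
--         current_st = f'( {words[0]} {words[1]} )'
--         for item in words[2:]:
--             current_st = f'( {current_st} {item} )'
--         return current_st
-- ===== SOURCE B (Python) =====
-- def left_branching(st):
--     words = st.replace('(', '').replace(')', '').split()
--     if len(words) == 1:
--         return f'( {words[0]} )'
--     return '( ' * (len(words) - 1) + words[0] + ''.join(f' {w} )' for w in words[1:])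
-- ===== Notes on version B (the rewrite author's own statement) =====
-- stated objective: simpler
-- what changed: Instead of re-wrapping the growing accumulator once per word, B emits the fixed left-nested shape in closed form: a repeated open-paren prefix of length n-1, the first word, then one join of per-word closing suffixes in a single pass.
import Mathlib
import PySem

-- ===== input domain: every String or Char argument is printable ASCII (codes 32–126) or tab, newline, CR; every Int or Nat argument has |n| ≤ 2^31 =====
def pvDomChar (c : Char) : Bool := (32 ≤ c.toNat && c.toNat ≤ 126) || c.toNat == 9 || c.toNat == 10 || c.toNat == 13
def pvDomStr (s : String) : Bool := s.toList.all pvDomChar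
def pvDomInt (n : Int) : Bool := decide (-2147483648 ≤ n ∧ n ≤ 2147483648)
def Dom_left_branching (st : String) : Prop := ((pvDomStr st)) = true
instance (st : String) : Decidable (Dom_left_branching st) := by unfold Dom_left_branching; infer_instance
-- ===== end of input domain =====

-- B builds the left-branching string in closed form (repeated open-paren prefix plus one pass of
-- per-word suffixes) instead of A's repeated re-wrapping of a growing accumulator; objective: simpler.

-- ===== PORT A =====
def left_branching (st : String) : String :=
  let words := PySem.Str.split₀ (PySem.Str.replace (PySem.Str.replace st "(" "") ")" "")
  match words with
  | [] => ""            -- Python raises IndexError here (words[0]); excluded by Pre_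
  | [w0] => "( " ++ w0 ++ " )"
  | w0 :: w1 :: rest =>  -- rest = words[2:]
      rest.foldl (fun current_st item => "( " ++ current_st ++ " " ++ item ++ " )")
        ("( " ++ w0 ++ " " ++ w1 ++ " )")

-- ===== PORT B =====
-- '( ' * n  (Python string repetition)
def pvStrRep (n : Nat) : String :=
  match n with
  | 0 => ""
  | k + 1 => "( " ++ pvStrRep k

-- ''.join(parts)
def pvStrConcat (l : List String) : String :=
  match l with
  | [] => ""
  | a :: r => a ++ pvStrConcat r

def left_branching_alt (st : String) : String :=
  let words := PySem.Str.split₀ (PySem.Str.replace (PySem.Str.replace st "(" "") ")" "")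
  match words with
  | [] => ""            -- Python raises IndexError here (words[0]); excluded by Pre_
  | [w0] => "( " ++ w0 ++ " )"
  | w0 :: ws =>          -- ws = words[1:]
      pvStrRep (words.length - 1) ++ w0 ++ pvStrConcat (ws.map (fun w => " " ++ w ++ " )"))

-- ===== PRECONDITION & SPEC =====
-- Pre_ excludes exactly the inputs whose text is all parentheses/whitespace: there Python's
-- words[0] raises IndexError in both A and B.
def Pre_left_branching (st : String) : Prop :=
  PySem.Str.split₀ (PySem.Str.replace (PySem.Str.replace st "(" "") ")" "") ≠ []
instance (st : String) : Decidable (Pre_left_branching st) := by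
  unfold Pre_left_branching; infer_instance
def pvWitness_left_branching : String := "a b"

def Spec_left_branching (st : String) (out : String) : Prop := out = left_branching_alt st
instance (st : String) (out : String) : Decidable (Spec_left_branching st out) := by
  unfold Spec_left_branching; infer_instance

-- ===== CLAIM (what is proved, stated in full; the proofs are below) =====
def Claim_equal_left_branching : Prop :=
  ∀ (st : String), Dom_left_branching st → Pre_left_branching st →
    Spec_left_branching st (left_branching st)

-- ===== LEMMAS AND PROOFS =====
theorem pvStrRep_succ' (k : Nat) : pvStrRep (k + 1) = pvStrRep k ++ "( " := by
  induction k with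
  | zero => rfl
  | succ n ih =>
      rw [show pvStrRep (n + 1 + 1) = "( " ++ pvStrRep (n + 1) from rfl, ih,
        ← String.append_assoc, show "( " ++ pvStrRep n = pvStrRep (n + 1) from rfl, ih]

theorem fold_eq (l : List String) (acc : String) :
    l.foldl (fun current_st item => "( " ++ current_st ++ " " ++ item ++ " )") acc
      = pvStrRep l.length ++ acc ++ pvStrConcat (l.map (fun w => " " ++ w ++ " )")) := by
  induction l generalizing acc with
  | nil => simp [pvStrRep, pvStrConcat]
  | cons x t ih =>
      simp only [List.foldl_cons, List.map_cons, List.length_cons, pvStrConcat, ih,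
        pvStrRep_succ']
      simp [String.append_assoc]

theorem left_branching_spec : Claim_equal_left_branching := by
  intro st _ hpre
  unfold Spec_left_branching left_branching left_branching_alt
  unfold Pre_left_branching at hpre
  set words := PySem.Str.split₀ (PySem.Str.replace (PySem.Str.replace st "(" "") ")" "") with hw
  match words with
  | [] => exact absurd rfl hpre
  | [w0] => rfl
  | w0 :: w1 :: rest =>
      simp only [fold_eq, List.length_cons, Nat.add_sub_cancel, pvStrRep_succ',
        List.map_cons, pvStrConcat]
      simp [String.append_assoc]
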